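-- pv_equiv track=rewrite | github.com/Attyuttam/cp-practice | TLE eliminators/unit_array_optimal.py | solution
-- ===== SOURCE A (Python) =====
-- def solution(n,arr):
--     np = 0
--     nn = 0
--     for v in arr:
--         if v == 1:
--             np+=1
--         else:
--             nn+=1
--
--     res = 0
--     while nn > np or nn%2 != 0:
--         nn-=1
--         np+=1
--         res+=1
--     return res
-- ===== SOURCE B (Python) =====
-- def solution(n, arr):
--     ones = arr.count(1)
--     others = len(arr) - ones
--     res = max(0, (others - ones + 1) // 2)
--     return res if (others - res) % 2 == 0 else res + 1
-- ===== Notes on version B (the rewrite author's own statement) =====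
-- stated objective: faster
-- what changed: Replaces A's step-by-step while loop (decrement nn / increment np until balanced and even) with a closed-form formula: res = max(0, ceil((others-ones)/2)) plus a parity fix-up, computed in O(1) after a single count.
import Mathlib
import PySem

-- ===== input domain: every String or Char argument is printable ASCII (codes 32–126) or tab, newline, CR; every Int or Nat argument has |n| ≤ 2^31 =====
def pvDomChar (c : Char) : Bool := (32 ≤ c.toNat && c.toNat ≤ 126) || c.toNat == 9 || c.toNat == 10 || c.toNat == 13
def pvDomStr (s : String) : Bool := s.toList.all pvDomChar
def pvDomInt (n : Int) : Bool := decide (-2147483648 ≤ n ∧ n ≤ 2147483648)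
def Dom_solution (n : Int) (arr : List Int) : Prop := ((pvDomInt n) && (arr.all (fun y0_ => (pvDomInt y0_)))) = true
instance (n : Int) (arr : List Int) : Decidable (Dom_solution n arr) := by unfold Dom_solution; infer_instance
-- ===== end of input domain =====

-- B replaces A's step-by-step while loop with a constant-time closed form (simpler/faster on the count phase's result).

-- ===== PORT A =====
-- A's while loop: while nn > np or nn % 2 != 0: nn -= 1; np += 1; res += 1
def solutionLoop (nn np res : Int) : Int :=
  if nn > np ∨ PySem.Int.mod nn 2 ≠ 0 then
    solutionLoop (nn - 1) (np + 1) (res + 1)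
  else res
termination_by 2 * (nn - np).toNat + (if PySem.Int.mod nn 2 = 0 then 0 else 1)
decreasing_by
  have hm : ∀ a : Int, PySem.Int.mod a 2 = a % 2 := fun a => PySem.Int.mod_eq_emod_of_pos (by omega)
  simp only [hm] at *
  by_cases hgt : np < nn
  · split <;> split <;> omega
  · have h0 : nn % 2 = 1 := by rcases ‹_ ∨ _› with h | h <;> omega
    have h1 : (nn - 1) % 2 = 0 := by omega
    simp [h0, h1]
    omega

def solution (n : Int) (arr : List Int) : Int :=
  let np := arr.foldl (fun np v => if v == 1 then np + 1 else np) 0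
  let nn := arr.foldl (fun nn v => if v == 1 then nn else nn + 1) 0
  solutionLoop nn np 0

-- ===== PORT B =====
def solution_alt (n : Int) (arr : List Int) : Int :=
  let ones : Int := PySem.List.count arr 1
  let others : Int := (arr.length : Int) - ones
  let res := max 0 (PySem.Int.floordiv (others - ones + 1) 2)
  if PySem.Int.mod (others - res) 2 == 0 then res else res + 1

-- ===== PRECONDITION & SPEC =====
def Spec_solution (n : Int) (arr : List Int) (out : Int) : Prop := out = solution_alt n arr
instance (n : Int) (arr : List Int) (out : Int) : Decidable (Spec_solution n arr out) := by unfold Spec_solution; infer_instance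

-- ===== CLAIM (what is proved, stated in full; the proofs are below) =====
def Claim_equal_solution : Prop := ∀ (n : Int) (arr : List Int), Dom_solution n arr → Spec_solution n arr (solution n arr)

-- ===== LEMMAS AND PROOFS =====

-- closed form of the loop result increment
def loopClosed (nn np : Int) : Int :=
  let res := max 0 (PySem.Int.floordiv (nn - np + 1) 2)
  if PySem.Int.mod (nn - res) 2 == 0 then res else res + 1

theorem solutionLoop_eq_closed (nn np res : Int) :
    solutionLoop nn np res = res + loopClosed nn np := by
  have hm : ∀ a : Int, PySem.Int.mod a 2 = a % 2 := fun a => PySem.Int.mod_eq_emod_of_pos (by omega)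
  have hd : ∀ a : Int, PySem.Int.floordiv a 2 = a / 2 := fun a => PySem.Int.floordiv_eq_ediv_of_pos (by omega)
  fun_induction solutionLoop nn np res with
  | case1 nn np res h ih =>
    rw [ih]
    simp only [loopClosed, hm, hd, beq_iff_eq] at *
    rcases max_cases 0 ((nn - np + 1) / 2) with ⟨h1, h2⟩ | ⟨h1, h2⟩ <;>
      rcases max_cases 0 ((nn - 1 - (np + 1) + 1) / 2) with ⟨h3, h4⟩ | ⟨h3, h4⟩ <;>
      simp only [h1, h3] <;> split <;> split <;> omega
  | case2 nn np res h =>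
    simp only [not_or, not_lt, Decidable.not_not] at h
    simp only [loopClosed, hm, hd, beq_iff_eq] at *
    rcases max_cases 0 ((nn - np + 1) / 2) with ⟨h1, h2⟩ | ⟨h1, h2⟩ <;>
      simp only [h1] <;> split <;> omega

theorem count_foldl (arr : List Int) (a : Int) :
    arr.foldl (fun np v => if v == 1 then np + 1 else np) a = a + PySem.List.count arr 1 := by
  induction arr generalizing a with
  | nil => simp [PySem.List.count]
  | cons x xs ih =>
    simp only [List.foldl_cons, ih, PySem.List.count, List.count_cons]
    by_cases h : x = 1 <;> simp [h, beq_iff_eq, PySem.List.count] <;> push_cast <;> ring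

theorem other_foldl (arr : List Int) (a : Int) :
    arr.foldl (fun nn v => if v == 1 then nn else nn + 1) a
      = a + (arr.length : Int) - PySem.List.count arr 1 := by
  induction arr generalizing a with
  | nil => simp [PySem.List.count]
  | cons x xs ih =>
    simp only [List.foldl_cons, ih, PySem.List.count, List.count_cons]
    by_cases h : x = 1 <;> simp [h, beq_iff_eq, PySem.List.count] <;> push_cast <;> ring

-- ===== VERDICT (by name: the statement is the Claim_ definition above) =====
theorem solution_spec : Claim_equal_solution := by
  intro n arr _
  show _ = _
  simp only [solution, solution_alt, count_foldl, other_foldl, solutionLoop_eq_closed,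
    loopClosed, zero_add]
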